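-- pv_equiv track=rewrite | github.com/MrMike92/8-Puzzle-Algoritmo-A- | juego8A.py | get_valid_moves_in_order
-- ===== SOURCE A (Python) =====
-- def get_valid_moves_in_order(board):
--     valid_moves = []
--     for i in range(3):
--         for j in range(3):
--             if board[i][j] == 0:
--                 if j > 0:
--                     valid_moves.append((i, j - 1, "Izquierda "))
--                 if i > 0:
--                     valid_moves.append((i - 1, j, "Arriba "))
--                 if j < 2:
--                     valid_moves.append((i, j + 1, "Derecha "))
--                 if i < 2:
--                     valid_moves.append((i + 1, j, "Abajo "))
--
--     valid_moves.sort(key=lambda x: ("Arriba ", "Abajo ", "Izquierda ", "Derecha ").index(x[2]))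
--
--     return valid_moves
-- ===== SOURCE B (Python) =====
-- def get_valid_moves_in_order(board):
--     zeros = [(i, j) for i in range(3) for j in range(3) if board[i][j] == 0]
--     moves = []
--     for di, dj, name in ((-1, 0, "Arriba "), (1, 0, "Abajo "), (0, -1, "Izquierda "), (0, 1, "Derecha ")):
--         for i, j in zeros:
--             ni, nj = i + di, j + dj
--             if 0 <= ni < 3 and 0 <= nj < 3:
--                 moves.append((ni, nj, name))
--     return moves
-- ===== Notes on version B (the rewrite author's own statement) =====
-- stated objective: simpler
-- what changed: B first collects the zero positions, then iterates the four directions in the final output order, appending in-bounds neighbours directly, so the sort step (with its tuple.index key) disappears.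
import Mathlib
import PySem

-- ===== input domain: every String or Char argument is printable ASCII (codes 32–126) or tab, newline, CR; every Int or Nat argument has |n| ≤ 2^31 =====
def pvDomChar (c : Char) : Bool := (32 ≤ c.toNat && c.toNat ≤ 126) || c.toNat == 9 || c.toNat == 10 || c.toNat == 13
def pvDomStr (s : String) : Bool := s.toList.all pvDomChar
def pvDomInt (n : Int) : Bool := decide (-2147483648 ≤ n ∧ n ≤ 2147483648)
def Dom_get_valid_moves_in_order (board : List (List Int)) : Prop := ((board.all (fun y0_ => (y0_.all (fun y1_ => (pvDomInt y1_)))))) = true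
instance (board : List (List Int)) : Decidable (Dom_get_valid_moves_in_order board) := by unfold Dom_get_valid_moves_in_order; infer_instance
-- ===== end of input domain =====

-- B replaces A's scan-then-sort (tuple.index sort key) by collecting the zero cells once and
-- emitting moves direction-by-direction in the final order, so no sort step is needed.

-- ===== PORT A =====
-- board[i][j]: pyGet? board i, then pyGet? of the row (none = IndexError, excluded by Pre_)
def cellA (board : List (List Int)) (i j : Int) : Option Int :=
  (PySem.List.pyGet? board i).bind (fun r => PySem.List.pyGet? r j)

def get_valid_moves_in_order (board : List (List Int)) : List (Int × Int × String) :=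
  let valid_moves := (PySem.List.pyRange 0 3 1).foldl (fun acc i =>
    (PySem.List.pyRange 0 3 1).foldl (fun acc j =>
      if cellA board i j = some 0 then
        (((acc ++ (if j > 0 then [(i, j - 1, "Izquierda ")] else []))
              ++ (if i > 0 then [(i - 1, j, "Arriba ")] else []))
              ++ (if j < 2 then [(i, j + 1, "Derecha ")] else []))
              ++ (if i < 2 then [(i + 1, j, "Abajo ")] else [])
      else acc) acc) []
  -- tuple(...).index(x[2]) never raises here (x[2] always one of the four names); .getD 0 is dead
  PySem.List.sorted valid_moves
    (fun x => (PySem.List.index? ["Arriba ", "Abajo ", "Izquierda ", "Derecha "] x.2.2).getD 0) false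

-- ===== PORT B =====
def cellB (board : List (List Int)) (i j : Int) : Option Int :=
  (PySem.List.pyGet? board i).bind (fun r => PySem.List.pyGet? r j)

def get_valid_moves_in_order_alt (board : List (List Int)) : List (Int × Int × String) :=
  let zeros := (PySem.List.pyRange 0 3 1).flatMap (fun i =>
    (PySem.List.pyRange 0 3 1).filterMap (fun j =>
      if cellB board i j = some 0 then some (i, j) else none))
  [((-1 : Int), (0 : Int), "Arriba "), (1, 0, "Abajo "), (0, -1, "Izquierda "), (0, 1, "Derecha ")].flatMap
    (fun d => zeros.filterMap (fun p =>
      let ni := p.1 + d.1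
      let nj := p.2 + d.2.1
      if 0 ≤ ni ∧ ni < 3 ∧ 0 ≤ nj ∧ nj < 3 then some (ni, nj, d.2.2) else none))

-- ===== PRECONDITION & SPEC =====
-- A indexes board[i][j] for all i, j in range(3): it raises IndexError (and so does B) unless
-- the board has at least 3 rows whose first 3 each have at least 3 entries.
def Pre_get_valid_moves_in_order (board : List (List Int)) : Prop :=
  3 ≤ board.length ∧ ∀ r ∈ board.take 3, 3 ≤ r.length
instance (board : List (List Int)) : Decidable (Pre_get_valid_moves_in_order board) := by
  unfold Pre_get_valid_moves_in_order; infer_instance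
def pvWitness_get_valid_moves_in_order : List (List Int) := [[1, 2, 3], [4, 0, 5], [6, 7, 8]]

def Spec_get_valid_moves_in_order (board : List (List Int)) (out : List (Int × Int × String)) : Prop := out = get_valid_moves_in_order_alt board
instance (board : List (List Int)) (out : List (Int × Int × String)) : Decidable (Spec_get_valid_moves_in_order board out) := by unfold Spec_get_valid_moves_in_order; infer_instance

-- ===== CLAIM (what is proved, stated in full; the proofs are below) =====
def Claim_equal_get_valid_moves_in_order : Prop := ∀ (board : List (List Int)), Dom_get_valid_moves_in_order board → Pre_get_valid_moves_in_order board → Spec_get_valid_moves_in_order board (get_valid_moves_in_order board)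

-- ===== LEMMAS AND PROOFS =====
lemma pyGet?_one_cons_cons (α : Type) (a b : α) (l : List α) :
    PySem.List.pyGet? (a :: b :: l) 1 = some b := by
  simp [PySem.List.pyGet?, PySem.List.pyIdx?]

lemma pyGet?_two_cons_cons_cons (α : Type) (a b c : α) (l : List α) :
    PySem.List.pyGet? (a :: b :: c :: l) 2 = some c := by
  have h : (2:Int) ≤ (l.length:Int) + 1 + 1 := by omega
  simp [PySem.List.pyGet?, PySem.List.pyIdx?, h]

-- both sides depend on board only through the nine tests board[i][j] == 0; after reducing the
-- indexing on a fully destructured board, generalize those tests to Booleans and check all 512 cases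
set_option maxHeartbeats 4000000 in
lemma agree (x00 x01 x02 x10 x11 x12 x20 x21 x22 : Int) (t0 t1 t2 : List Int) (rest : List (List Int)) :
    get_valid_moves_in_order ((x00::x01::x02::t0)::(x10::x11::x12::t1)::(x20::x21::x22::t2)::rest)
    = get_valid_moves_in_order_alt ((x00::x01::x02::t0)::(x10::x11::x12::t1)::(x20::x21::x22::t2)::rest) := by
  simp only [get_valid_moves_in_order, get_valid_moves_in_order_alt,
    show PySem.List.pyRange 0 3 1 = [0,1,2] from by decide,
    cellA, cellB, List.foldl, List.flatMap, List.map, List.flatten, List.filterMap,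
    PySem.List.pyGet?_zero_cons, pyGet?_one_cons_cons, pyGet?_two_cons_cons_cons,
    Option.bind, Option.some.injEq]
  simp only [← Bool.cond_decide]
  generalize decide (x00 = 0) = z00
  generalize decide (x01 = 0) = z01
  generalize decide (x02 = 0) = z02
  generalize decide (x10 = 0) = z10
  generalize decide (x11 = 0) = z11
  generalize decide (x12 = 0) = z12
  generalize decide (x20 = 0) = z20
  generalize decide (x21 = 0) = z21
  generalize decide (x22 = 0) = z22
  revert z00 z01 z02 z10 z11 z12 z20 z21 z22
  decide

-- ===== VERDICT (by name: the statement is the Claim_ definition above) =====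
theorem get_valid_moves_in_order_spec : Claim_equal_get_valid_moves_in_order := by
  intro board _ hpre
  obtain ⟨hlen, hrows⟩ := hpre
  unfold Spec_get_valid_moves_in_order
  rcases board with _ | ⟨r0, _ | ⟨r1, _ | ⟨r2, rest⟩⟩⟩ <;> simp at hlen
  have h0 : 3 ≤ r0.length := hrows r0 (by simp)
  have h1 : 3 ≤ r1.length := hrows r1 (by simp)
  have h2 : 3 ≤ r2.length := hrows r2 (by simp)
  rcases r0 with _ | ⟨x00, _ | ⟨x01, _ | ⟨x02, t0⟩⟩⟩ <;> simp at h0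
  rcases r1 with _ | ⟨x10, _ | ⟨x11, _ | ⟨x12, t1⟩⟩⟩ <;> simp at h1
  rcases r2 with _ | ⟨x20, _ | ⟨x21, _ | ⟨x22, t2⟩⟩⟩ <;> simp at h2
  exact (agree x00 x01 x02 x10 x11 x12 x20 x21 x22 t0 t1 t2 rest)
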